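-- pv_equiv track=rewrite | github.com/Sosshi/AI | tictactoe/module/tictactoe.py | winning_coordinates
-- ===== SOURCE A (Python) =====
-- def winning_coordinates(board_size):
--     winning_coordinates = []
--
--     for i in range(board_size):
--         winning_coordinates.append([(i, j) for j in range(board_size)])
--
--     for j in range(board_size):
--         winning_coordinates.append([(i, j) for i in range(board_size)])
--
--     diagonal1 = [(i, i) for i in range(board_size)]
--     diagonal2 = [(i, board_size - 1 - i) for i in range(board_size)]
--     winning_coordinates.append(diagonal1)
--     winning_coordinates.append(diagonal2)
--     return winning_coordinates
-- ===== SOURCE B (Python) =====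
-- def winning_coordinates(board_size):
--     # Generate the grid (rows) once; derive every other line from it:
--     # columns are rows with coordinates swapped, diagonals are filters of the grid.
--     rows = [[(i, j) for j in range(board_size)] for i in range(board_size)]
--     cols = [[(j, i) for (i, j) in row] for row in rows]
--     diag1 = [p for row in rows for p in row if p[0] == p[1]]
--     diag2 = [p for row in rows for p in row if p[0] + p[1] == board_size - 1]
--     return rows + cols + [diag1, diag2]
-- ===== Notes on version B (the rewrite author's own statement) =====
-- stated objective: alternative
-- what changed: A generates each line group independently with its own range pass (rows loop, columns loop, two diagonal comprehensions); B generates only the grid of rows once and derives the other lines from that data: columns by swapping the coordinates of each row, and each diagonal by filtering the grid for its defining equation (i==j, i+j==n-1).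
import Mathlib
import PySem

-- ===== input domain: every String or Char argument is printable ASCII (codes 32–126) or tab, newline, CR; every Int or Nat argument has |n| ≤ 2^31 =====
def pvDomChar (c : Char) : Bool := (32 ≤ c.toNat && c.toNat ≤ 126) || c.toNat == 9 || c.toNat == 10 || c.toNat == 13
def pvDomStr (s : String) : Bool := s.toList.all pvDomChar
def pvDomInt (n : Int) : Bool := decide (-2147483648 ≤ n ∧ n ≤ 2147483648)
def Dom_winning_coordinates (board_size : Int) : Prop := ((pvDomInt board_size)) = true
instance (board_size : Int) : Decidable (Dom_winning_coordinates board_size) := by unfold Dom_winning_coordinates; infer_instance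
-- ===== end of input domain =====

-- B generates only the grid of rows once and derives every other line from that data
-- (columns by coordinate swap, diagonals by filtering the grid), instead of A's four
-- independent generation passes (objective: alternative decomposition, same output).

-- ===== PORT A =====
def winning_coordinates (board_size : Int) : List (List (Int × Int)) :=
  let wc : List (List (Int × Int)) := []
  let wc := (PySem.List.pyRange 0 board_size).foldl
    (fun acc i => acc ++ [(PySem.List.pyRange 0 board_size).map (fun j => (i, j))]) wc
  let wc := (PySem.List.pyRange 0 board_size).foldl
    (fun acc j => acc ++ [(PySem.List.pyRange 0 board_size).map (fun i => (i, j))]) wc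
  let diagonal1 := (PySem.List.pyRange 0 board_size).map (fun i => (i, i))
  let diagonal2 := (PySem.List.pyRange 0 board_size).map (fun i => (i, board_size - 1 - i))
  (wc ++ [diagonal1]) ++ [diagonal2]

-- ===== PORT B =====
def winning_coordinates_alt (board_size : Int) : List (List (Int × Int)) :=
  let rows := (PySem.List.pyRange 0 board_size).map
    (fun i => (PySem.List.pyRange 0 board_size).map (fun j => (i, j)))
  let cols := rows.map (fun row => row.map (fun p => (p.2, p.1)))
  -- [p for row in rows for p in row if cond]  =  flatMap (filter cond)
  let diag1 := rows.flatMap (fun row => row.filter (fun p => p.1 == p.2))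
  let diag2 := rows.flatMap (fun row => row.filter (fun p => p.1 + p.2 == board_size - 1))
  rows ++ cols ++ [diag1, diag2]

-- ===== PRECONDITION & SPEC =====
def Spec_winning_coordinates (board_size : Int) (out : List (List (Int × Int))) : Prop := out = winning_coordinates_alt board_size
instance (board_size : Int) (out : List (List (Int × Int))) : Decidable (Spec_winning_coordinates board_size out) := by unfold Spec_winning_coordinates; infer_instance

-- ===== CLAIM (what is proved, stated in full; the proofs are below) =====
def Claim_equal_winning_coordinates : Prop := ∀ (board_size : Int), Dom_winning_coordinates board_size → Spec_winning_coordinates board_size (winning_coordinates board_size)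

-- ===== LEMMAS AND PROOFS =====

theorem filter_beq_of_nodup (l : List Int) (h : l.Nodup) (i : Int) (hi : i ∈ l) :
    l.filter (fun j => i == j) = [i] := by
  induction l with
  | nil => cases hi
  | cons x xs ih =>
    rcases List.mem_cons.mp hi with rfl | hmem
    · have hnot : i ∉ xs := (List.nodup_cons.mp h).1
      have hfil : xs.filter (fun j => i == j) = [] := by
        rw [List.filter_eq_nil_iff]
        intro a ha hba
        rw [beq_iff_eq] at hba
        exact hnot (hba ▸ ha)
      simp [hfil]
    · have hne : i ≠ x := fun e => ((List.nodup_cons.mp h).1) (e ▸ hmem)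
      simp only [List.filter_cons]
      rw [if_neg (by simp [hne])]
      exact ih (List.nodup_cons.mp h).2 hmem

theorem flatMap_eq_map {β : Type} (l : List Int) (f : Int → List β) (g : Int → β)
    (h : ∀ x ∈ l, f x = [g x]) : l.flatMap f = l.map g := by
  induction l with
  | nil => rfl
  | cons x xs ih =>
    simp only [List.flatMap_cons, List.map_cons, h x (List.mem_cons_self),
      ih (fun y hy => h y (List.mem_cons_of_mem _ hy))]
    rfl

theorem row_filter_diag1 (n i : Int) (h1 : 0 ≤ i) (h2 : i < n) :
    ((PySem.List.pyRange 0 n).map (fun j => (i, j))).filter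
      (fun p => p.1 == p.2) = [(i, i)] := by
  rw [List.filter_map]
  have : (PySem.List.pyRange 0 n).filter ((fun p : Int × Int => p.1 == p.2) ∘ (fun j => (i, j)))
      = (PySem.List.pyRange 0 n).filter (fun j => i == j) := by
    apply List.filter_congr; intro j _; rfl
  rw [this, filter_beq_of_nodup _ (PySem.List.nodup_pyRange_one 0 n) i
    (PySem.List.mem_pyRange_one.mpr ⟨h1, h2⟩)]
  rfl

theorem row_filter_diag2 (n i : Int) (h1 : 0 ≤ i) (h2 : i < n) :
    ((PySem.List.pyRange 0 n).map (fun j => (i, j))).filter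
      (fun p => p.1 + p.2 == n - 1) = [(i, n - 1 - i)] := by
  rw [List.filter_map]
  have : (PySem.List.pyRange 0 n).filter
        ((fun p : Int × Int => p.1 + p.2 == n - 1) ∘ (fun j => (i, j)))
      = (PySem.List.pyRange 0 n).filter (fun j => (n - 1 - i) == j) := by
    apply List.filter_congr; intro j _
    show (i + j == n - 1) = ((n - 1 - i) == j)
    rcases eq_or_ne (i + j) (n - 1) with heq | hne
    · simp [heq, show n - 1 - i = j by omega]
    · simp [hne, show n - 1 - i ≠ j by omega]
  rw [this, filter_beq_of_nodup _ (PySem.List.nodup_pyRange_one 0 n) (n - 1 - i)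
    (PySem.List.mem_pyRange_one.mpr ⟨by omega, by omega⟩)]
  rfl

theorem winning_coordinates_eq_alt (n : Int) :
    winning_coordinates n = winning_coordinates_alt n := by
  unfold winning_coordinates winning_coordinates_alt
  simp only [PySem.List.foldl_append_singleton_eq_map, List.map_map, List.flatMap_map]
  have hd1 : (PySem.List.pyRange 0 n).flatMap
      (fun i => ((PySem.List.pyRange 0 n).map (fun j => (i, j))).filter (fun p => p.1 == p.2))
      = (PySem.List.pyRange 0 n).map (fun i => (i, i)) := by
    apply flatMap_eq_map
    intro i hi
    have := PySem.List.mem_pyRange_one.mp hi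
    exact row_filter_diag1 n i this.1 this.2
  have hd2 : (PySem.List.pyRange 0 n).flatMap
      (fun i => ((PySem.List.pyRange 0 n).map (fun j => (i, j))).filter
        (fun p => p.1 + p.2 == n - 1))
      = (PySem.List.pyRange 0 n).map (fun i => (i, n - 1 - i)) := by
    apply flatMap_eq_map
    intro i hi
    have := PySem.List.mem_pyRange_one.mp hi
    exact row_filter_diag2 n i this.1 this.2
  simp [Function.comp, hd1, hd2]

-- ===== VERDICT (by name: the statement is the Claim_ definition above) =====
theorem winning_coordinates_spec : Claim_equal_winning_coordinates := by
  intro n _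
  unfold Spec_winning_coordinates
  exact winning_coordinates_eq_alt n
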